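-- pv_equiv track=rewrite | github.com/arsyadmdz/efta | efta/species.py | _iter_dollars
-- ===== SOURCE A (Python) =====
-- def _find_dollar(s: str, start: int = 0):
--     """
--     Find the next ``$(expr)`` in *s* starting at *start*.
--     Returns ``(begin, end, expr)`` or ``None`` if not found.
--     *begin* is the index of '$', *end* is the index after the closing ')',
--     *expr* is the expression string (without outer ``$()``).
--     Handles arbitrarily nested parentheses.
--     """
--     i = s.find('$(', start)
--     if i == -1:
--         return None
--     depth = 0
--     j = i + 1    # points at '('
--     while j < len(s):
--         if s[j] == '(':
--             depth += 1
--         elif s[j] == ')':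
--             depth -= 1
--             if depth == 0:
--                 return (i, j + 1, s[i + 2: j])
--         j += 1
--     return None  # unmatched
--
-- def _iter_dollars(s: str):
--     """Yield all ``(begin, end, expr)`` tuples for ``$(...)`` in *s``."""
--     pos = 0
--     while True:
--         hit = _find_dollar(s, pos)
--         if hit is None:
--             break
--         yield hit
--         pos = hit[1]
-- ===== SOURCE B (Python) =====
-- def _iter_dollars(s: str):
--     """Yield all ``(begin, end, expr)`` tuples for dollar-paren spans in *s*.
--
--     Single left-to-right state machine: ``start`` is -1 while outside a
--     span; inside, ``depth`` counts open parentheses of the current span.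
--     A trailing unmatched opener ends the iteration (as the original does).
--     """
--     start = -1
--     depth = 0
--     i = 0
--     n = len(s)
--     while i < n:
--         c = s[i]
--         if start == -1:
--             if c == '$' and i + 1 < n and s[i + 1] == '(':
--                 start = i
--                 depth = 1
--                 i += 2
--                 continue
--         elif c == '(':
--             depth += 1
--         elif c == ')':
--             depth -= 1
--             if depth == 0:
--                 yield (start, i + 1, s[start + 2:i])
--                 start = -1
--         i += 1
-- ===== Notes on version B (the rewrite author's own statement) =====
-- stated objective: alternative
-- what changed: Replaces A's restart-driven design (str.find of the dollar-paren opener plus a separate inner paren-matching scan, repeated from each span's end) by a single left-to-right state machine over the string that maintains start/depth and yields when depth returns to 0.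
import Mathlib
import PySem

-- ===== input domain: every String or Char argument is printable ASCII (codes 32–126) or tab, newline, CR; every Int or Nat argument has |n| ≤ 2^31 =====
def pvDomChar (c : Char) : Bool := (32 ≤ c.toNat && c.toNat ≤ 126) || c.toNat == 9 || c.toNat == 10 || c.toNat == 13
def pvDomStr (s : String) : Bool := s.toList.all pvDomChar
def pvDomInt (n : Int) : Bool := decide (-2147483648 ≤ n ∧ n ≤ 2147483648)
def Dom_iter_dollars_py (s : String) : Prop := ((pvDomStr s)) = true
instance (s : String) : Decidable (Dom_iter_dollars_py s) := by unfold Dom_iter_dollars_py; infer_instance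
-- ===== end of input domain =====

-- B replaces A's find-then-rescan design by a single start/depth state machine; same cost, different decomposition.

-- s[a:b] for 0 ≤ a ≤ b ≤ len(s): exact on these in-range indices (both Pythons only slice in range).
def exprStr (full : List Char) (a b : Nat) : String :=
  String.ofList ((full.drop a).take (b - a))

-- ===== PORT A =====
-- port of Python's s.find of the two-char dollar-paren needle from pos: scan each offset of the suffix (exact for this fixed ASCII needle)
def findDollar : List Char → Nat → Option Nat
  | [], _ => none
  | c :: rest, i =>
    if c = '$' ∧ rest.head? = some '(' then some i
    else findDollar rest (i + 1)

-- inner while of _find_dollar: j walks the suffix, depth counts parens; returns the index of the closing ')'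
def scanDepth : List Char → Nat → Int → Option Nat
  | [], _, _ => none
  | c :: rest, j, depth =>
    if c = '(' then scanDepth rest (j + 1) (depth + 1)
    else if c = ')' then
      if depth - 1 = 0 then some j else scanDepth rest (j + 1) (depth - 1)
    else scanDepth rest (j + 1) depth

theorem findDollar_le : ∀ (l : List Char) (i k : Nat), findDollar l i = some k → i ≤ k := by
  intro l
  induction l with
  | nil => intro i k h; simp [findDollar] at h
  | cons c rest ih =>
    intro i k h
    simp only [findDollar] at h
    split at h
    · simp at h; omega
    · have := ih (i + 1) k h; omega

theorem scanDepth_bounds : ∀ (l : List Char) (j : Nat) (d : Int) (k : Nat),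
    scanDepth l j d = some k → j ≤ k ∧ k < j + l.length := by
  intro l
  induction l with
  | nil => intro j d k h; simp [scanDepth] at h
  | cons c rest ih =>
    intro j d k h
    simp only [scanDepth] at h
    split at h
    · have := ih (j + 1) (d + 1) k h; simp; omega
    · split at h
      · split at h
        · simp at h; simp; omega
        · have := ih (j + 1) (d - 1) k h; simp; omega
      · have := ih (j + 1) d k h; simp; omega

-- outer while of _iter_dollars: repeatedly _find_dollar from pos, yield, resume at the span's end
def loopA (full : List Char) (pos : Nat) : List (Int × Int × String) :=
  match h1 : findDollar (full.drop pos) pos with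
  | none => []
  | some i =>
    match h2 : scanDepth (full.drop (i + 1)) (i + 1) 0 with
    | none => []
    | some j =>
      ((i : Int), ((j + 1 : Nat) : Int), exprStr full (i + 2) j) :: loopA full (j + 1)
termination_by full.length - pos
decreasing_by
  have hi := findDollar_le (full.drop pos) pos i h1
  have hj := scanDepth_bounds (full.drop (i + 1)) (i + 1) 0 j h2
  rw [List.length_drop] at hj
  omega

def iter_dollars_py (s : String) : List (Int × Int × String) := loopA s.toList 0

-- ===== PORT B =====
-- single state machine: state = none while outside a span, some start inside; depth counts open parens
def loopB (full : List Char) : List Char → Nat → Option Nat → Int → List (Int × Int × String)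
  | [], _, _, _ => []
  | c :: rest, i, none, d =>
    if c = '$' ∧ rest.head? = some '(' then loopB full rest.tail (i + 2) (some i) 1
    else loopB full rest (i + 1) none d
  | c :: rest, i, some st, d =>
    if c = '(' then loopB full rest (i + 1) (some st) (d + 1)
    else if c = ')' then
      if d - 1 = 0 then
        ((st : Int), ((i + 1 : Nat) : Int), exprStr full (st + 2) i) :: loopB full rest (i + 1) none 0
      else loopB full rest (i + 1) (some st) (d - 1)
    else loopB full rest (i + 1) (some st) d
termination_by l _ _ _ => l.length
decreasing_by all_goals simp [List.length_tail]

def iter_dollars_py_alt (s : String) : List (Int × Int × String) :=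
  loopB s.toList s.toList 0 none 0

-- ===== PRECONDITION & SPEC =====
def Spec_iter_dollars_py (s : String) (out : List (Int × Int × String)) : Prop := out = iter_dollars_py_alt s
instance (s : String) (out : List (Int × Int × String)) : Decidable (Spec_iter_dollars_py s out) := by unfold Spec_iter_dollars_py; infer_instance

-- ===== CLAIM (what is proved, stated in full; the proofs are below) =====
def Claim_equal_iter_dollars_py : Prop := ∀ (s : String), Dom_iter_dollars_py s → Spec_iter_dollars_py s (iter_dollars_py s)

-- ===== LEMMAS AND PROOFS =====

-- findDollar locates an actual dollar-paren occurrence in the list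
theorem findDollar_shape : ∀ (l : List Char) (i k : Nat), findDollar l i = some k →
    l.drop (k - i) = '$' :: '(' :: l.drop (k - i + 2) := by
  intro l
  induction l with
  | nil => intro i k h; simp [findDollar] at h
  | cons c rest ih =>
    intro i k h
    simp only [findDollar] at h
    split at h
    · rename_i hc
      obtain ⟨hc1, hc2⟩ := hc
      simp at h; subst h
      cases rest with
      | nil => simp at hc2
      | cons c2 t =>
        simp at hc2
        simp [hc1, hc2]
    · have hle := findDollar_le rest (i + 1) k h
      have := ih (i + 1) k h
      rw [show k - i = (k - (i + 1)) + 1 from by omega, List.drop_succ_cons,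
          show k - (i + 1) + 1 + 2 = (k - (i + 1) + 2) + 1 from by omega, List.drop_succ_cons]
      exact this

-- inside a span, B behaves exactly as A's inner while
theorem loopB_inside (full : List Char) : ∀ (l : List Char) (i st : Nat) (d : Int),
    loopB full l i (some st) d =
      match scanDepth l i d with
      | none => []
      | some j => ((st : Int), ((j + 1 : Nat) : Int), exprStr full (st + 2) j)
          :: loopB full (l.drop (j + 1 - i)) (j + 1) none 0 := by
  intro l
  induction l with
  | nil => intro i st d; simp [loopB, scanDepth]
  | cons c rest ih =>
    intro i st d
    simp only [loopB, scanDepth]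
    split
    · rw [ih]
      cases h : scanDepth rest (i + 1) (d + 1) with
      | none => rfl
      | some j =>
        have hb := scanDepth_bounds rest (i + 1) (d + 1) j h
        simp only
        rw [show j + 1 - i = (j + 1 - (i + 1)) + 1 from by omega, List.drop_succ_cons]
    · split
      · split
        · simp [show i + 1 - i = 1 from by omega]
        · rw [ih]
          cases h : scanDepth rest (i + 1) (d - 1) with
          | none => rfl
          | some j =>
            have hb := scanDepth_bounds rest (i + 1) (d - 1) j h
            simp only
            rw [show j + 1 - i = (j + 1 - (i + 1)) + 1 from by omega, List.drop_succ_cons]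
      · rw [ih]
        cases h : scanDepth rest (i + 1) d with
        | none => rfl
        | some j =>
          have hb := scanDepth_bounds rest (i + 1) d j h
          simp only
          rw [show j + 1 - i = (j + 1 - (i + 1)) + 1 from by omega, List.drop_succ_cons]

-- outside a span, B scans for the dollar-paren opener exactly as A's find does
theorem loopB_outside (full : List Char) : ∀ (l : List Char) (pos : Nat),
    loopB full l pos none 0 =
      match findDollar l pos with
      | none => []
      | some i => loopB full (l.drop (i - pos + 2)) (i + 2) (some i) 1 := by
  intro l
  induction l with
  | nil => intro pos; simp [loopB, findDollar]
  | cons c rest ih =>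
    intro pos
    simp only [loopB, findDollar]
    split
    · rename_i hc
      obtain ⟨hc1, hc2⟩ := hc
      simp only
      rw [show pos - pos + 2 = 2 from by omega]
      cases rest with
      | nil => simp at hc2
      | cons c2 t => simp
    · rw [ih]
      cases h : findDollar rest (pos + 1) with
      | none => rfl
      | some i =>
        have hle := findDollar_le rest (pos + 1) i h
        simp only
        rw [show i - pos + 2 = (i - (pos + 1) + 2) + 1 from by omega, List.drop_succ_cons]

theorem main_eq (full : List Char) : ∀ (n pos : Nat), full.length - pos ≤ n →
    loopB full (full.drop pos) pos none 0 = loopA full pos := by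
  intro n
  induction n with
  | zero =>
    intro pos hle
    have hdrop : full.drop pos = [] := List.drop_eq_nil_of_le (by omega)
    rw [loopA, hdrop]
    simp [loopB, findDollar]
  | succ n ih =>
    intro pos hle
    rw [loopA, loopB_outside]
    cases h1 : findDollar (full.drop pos) pos with
    | none => rfl
    | some i =>
      have hi := findDollar_le (full.drop pos) pos i h1
      have hshape := findDollar_shape (full.drop pos) pos i h1
      rw [List.drop_drop, show pos + (i - pos) = i from by omega] at hshape
      rw [List.drop_drop, show pos + (i - pos + 2) = i + 2 from by omega] at hshape
      -- A's inner scan starts on the open paren right after the dollar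
      have hdi1 : full.drop (i + 1) = '(' :: full.drop (i + 2) := by
        rw [← List.tail_drop, hshape]; rfl
      have hscan : scanDepth (full.drop (i + 1)) (i + 1) 0
          = scanDepth (full.drop (i + 2)) (i + 2) 1 := by
        rw [hdi1]; simp [scanDepth]
      dsimp only
      rw [List.drop_drop, show pos + (i - pos + 2) = i + 2 from by omega]
      rw [loopB_inside, hscan]
      cases h2 : scanDepth (full.drop (i + 2)) (i + 2) 1 with
      | none => rfl
      | some j =>
        have hj := scanDepth_bounds (full.drop (i + 2)) (i + 2) 1 j h2
        rw [List.length_drop] at hj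
        dsimp only
        rw [List.drop_drop, show i + 2 + (j + 1 - (i + 2)) = j + 1 from by omega]
        rw [ih (j + 1) (by omega)]

-- ===== VERDICT (by name: the statement is the Claim_ definition above) =====
theorem iter_dollars_py_spec : Claim_equal_iter_dollars_py := by
  intro s _
  unfold Spec_iter_dollars_py iter_dollars_py iter_dollars_py_alt
  exact (main_eq s.toList s.toList.length 0 (by omega)).symm ▸
    (main_eq s.toList s.toList.length 0 (by omega))
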